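-- pv_equiv track=rewrite | github.com/bradhawkins85/MyPortal | app/security/plausible_tracking.py | _is_safe_url
-- ===== SOURCE A (Python) =====
-- def _is_safe_url(url: str) -> bool:
--     """Check if URL is safe to use in script src attribute.
--
--     Args:
--         url: URL to validate
--
--     Returns:
--         True if URL is safe, False otherwise
--     """
--     if not url or not isinstance(url, str):
--         return False
--
--     # Must be HTTP or HTTPS (HTTPS is strongly recommended)
--     if not url.startswith("https://") and not url.startswith("http://"):
--         return False
--
--     # Must not contain quotes or angle brackets that could break HTML
--     if any(char in url for char in ['"', "'", '<', '>', '\n', '\r', '\t']):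
--         return False
--
--     return True
-- ===== SOURCE B (Python) =====
-- def _consume(lit, s, i):
--     """Match literal lit in s starting at index i; new index or None."""
--     for ch in lit:
--         if i >= len(s) or s[i] != ch:
--             return None
--         i += 1
--     return i
--
--
-- def _is_safe_url(url: str) -> bool:
--     """Check if URL is safe to use in script src attribute."""
--     if not url or not isinstance(url, str):
--         return False
--     # single left-to-right scan: "http", optional "s", "://", then body
--     i = _consume("http", url, 0)
--     if i is None:
--         return False
--     if i < len(url) and url[i] == 's':
--         i += 1
--     i = _consume("://", url, i)
--     if i is None:
--         return False
--     while i < len(url):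
--         if url[i] in '"\'<>\n\r\t':
--             return False
--         i += 1
--     return True
-- ===== Notes on version B (the rewrite author's own statement) =====
-- stated objective: alternative
-- what changed: B is a single left-to-right character scanner (consume the literal 'http', an optional 's', then '://', then walk the remaining characters rejecting forbidden ones) instead of A's two whole-prefix startswith comparisons plus a separate any(substring in url) pass over the forbidden characters.
import Mathlib
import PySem

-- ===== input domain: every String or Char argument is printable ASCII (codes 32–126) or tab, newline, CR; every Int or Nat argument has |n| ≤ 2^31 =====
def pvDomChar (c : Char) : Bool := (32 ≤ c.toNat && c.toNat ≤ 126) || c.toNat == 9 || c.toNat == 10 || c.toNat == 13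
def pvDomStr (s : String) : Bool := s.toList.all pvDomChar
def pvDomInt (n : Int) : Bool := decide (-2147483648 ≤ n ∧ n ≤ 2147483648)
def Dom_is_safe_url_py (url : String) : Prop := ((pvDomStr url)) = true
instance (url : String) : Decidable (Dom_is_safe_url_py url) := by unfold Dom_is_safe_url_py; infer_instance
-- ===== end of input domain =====

-- B is a single left-to-right character scanner (consume "http", an optional 's', "://",
-- then walk the body rejecting forbidden characters) instead of A's two whole-prefix
-- startswith checks plus a separate any-substring pass (objective: alternative).

-- ===== PORT A =====
def pvBadSubs : List String := ["\"", "'", "<", ">", "\n", "\r", "\t"]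

def is_safe_url_py (url : String) : Bool :=
  -- `not url` on a string is the emptiness test; `isinstance(url, str)` is always true here
  if PySem.Str.len url == 0 then false
  else if !(PySem.Str.startswith url "https://") && !(PySem.Str.startswith url "http://") then false
  else if pvBadSubs.any (fun ch => PySem.Str.isIn ch url) then false
  else true

-- ===== PORT B =====
-- _consume(lit, s, i): the index i into s is represented by the remaining suffix s[i:];
-- the for-loop over lit is the structural recursion on lit (exact).
def pvConsume : List Char → List Char → Option (List Char)
  | [], cs => some cs
  | _ :: _, [] => none            -- i >= len(s)
  | l :: ls, c :: cs => if c = l then pvConsume ls cs else none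

-- the final while-loop over the remaining characters
def pvBody : List Char → Bool
  | [] => true
  | c :: cs => if ['"', '\'', '<', '>', '\n', '\r', '\t'].contains c then false else pvBody cs

def is_safe_url_py_alt (url : String) : Bool :=
  -- `isinstance(url, str)` is always true here
  let cs := url.toList
  if cs.isEmpty then false
  else
    match pvConsume "http".toList cs with
    | none => false
    | some rest =>
      let rest := if rest.head? = some 's' then rest.tail else rest
      match pvConsume "://".toList rest with
      | none => false
      | some body => pvBody body

-- ===== PRECONDITION & SPEC =====
def Spec_is_safe_url_py (url : String) (out : Bool) : Prop := out = is_safe_url_py_alt url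
instance (url : String) (out : Bool) : Decidable (Spec_is_safe_url_py url out) := by unfold Spec_is_safe_url_py; infer_instance

-- ===== CLAIM (what is proved, stated in full; the proofs are below) =====
def Claim_equal_is_safe_url_py : Prop := ∀ (url : String), Dom_is_safe_url_py url → Spec_is_safe_url_py url (is_safe_url_py url)

-- ===== LEMMAS AND PROOFS =====

theorem pv_consume_eq_some (lit cs rest : List Char) :
    pvConsume lit cs = some rest ↔ cs = lit ++ rest := by
  induction lit generalizing cs with
  | nil => simp [pvConsume, eq_comm]
  | cons l ls ih =>
    cases cs with
    | nil => simp [pvConsume]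
    | cons c cs =>
      by_cases h : c = l
      · subst h; simp [pvConsume, ih]
      · simp [pvConsume, h]

theorem pv_body_eq_all (cs : List Char) :
    pvBody cs = cs.all (fun c => !(['"', '\'', '<', '>', '\n', '\r', '\t'].contains c)) := by
  induction cs with
  | nil => rfl
  | cons c cs ih =>
    simp only [pvBody, List.all_cons, ih]
    split_ifs with h
    · rw [h]; rfl
    · rw [Bool.not_eq_true] at h
      rw [h]; rfl

-- what B returns, as a proposition: the scanner accepts exactly "http(s)://" ++ safe body
theorem pv_B_true_iff (url : String) :
    is_safe_url_py_alt url = true ↔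
    ∃ body, (url.toList = "https://".toList ++ body ∨ url.toList = "http://".toList ++ body) ∧
      pvBody body = true := by
  have hL5 : "https://".toList = ['h','t','t','p','s',':','/','/'] := by decide
  have hL4 : "http://".toList = ['h','t','t','p',':','/','/'] := by decide
  constructor
  · intro h
    simp only [is_safe_url_py_alt] at h
    by_cases hempty : url.toList.isEmpty = true
    · rw [if_pos hempty] at h; exact absurd h Bool.false_ne_true
    rw [if_neg hempty] at h
    rcases h1 : pvConsume "http".toList url.toList with _ | rest
    · rw [h1] at h; exact absurd h Bool.false_ne_true
    rw [h1] at h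
    dsimp only at h
    have hcs := (pv_consume_eq_some _ _ _).mp h1
    by_cases hs : rest.head? = some 's'
    · rw [if_pos hs] at h
      rcases h2 : pvConsume "://".toList rest.tail with _ | body
      · rw [h2] at h; exact absurd h Bool.false_ne_true
      rw [h2] at h
      have htail := (pv_consume_eq_some _ _ _).mp h2
      refine ⟨body, Or.inl ?_, h⟩
      cases rest with
      | nil => simp at hs
      | cons r rs =>
        simp only [List.head?_cons, Option.some.injEq] at hs
        simp only [List.tail_cons] at htail
        rw [hcs, hs, htail, hL5]; rfl
    · rw [if_neg hs] at h
      rcases h2 : pvConsume "://".toList rest with _ | body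
      · rw [h2] at h; exact absurd h Bool.false_ne_true
      rw [h2] at h
      have htail := (pv_consume_eq_some _ _ _).mp h2
      exact ⟨body, Or.inr (by rw [hcs, htail, hL4]; rfl), h⟩
  · rintro ⟨body, hcs | hcs, hbody⟩
    · have he : is_safe_url_py_alt url = pvBody body := by
        simp only [is_safe_url_py_alt, hcs, hL5]
        simp [pvConsume]
      rw [he]; exact hbody
    · have he : is_safe_url_py_alt url = pvBody body := by
        simp only [is_safe_url_py_alt, hcs, hL4]
        simp [pvConsume]
      rw [he]; exact hbody

-- what A returns, as a proposition
theorem pv_A_true_iff (url : String) :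
    is_safe_url_py url = true ↔
    (("https://".toList <+: url.toList ∨ "http://".toList <+: url.toList) ∧
      pvBadSubs.any (fun ch => PySem.Str.isIn ch url) = false) := by
  have hsw1 : PySem.Str.startswith url "https://" = true ↔ "https://".toList <+: url.toList := by
    rw [PySem.Str.startswith_eq]; exact PySem.Chars.startswith_iff _ _
  have hsw2 : PySem.Str.startswith url "http://" = true ↔ "http://".toList <+: url.toList := by
    rw [PySem.Str.startswith_eq]; exact PySem.Chars.startswith_iff _ _
  unfold is_safe_url_py
  split_ifs with h1 h2 h3
  · have hl : url.toList = [] := by simpa [PySem.Str.len_eq] using h1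
    simp only [false_iff]
    rintro ⟨hp | hp, -⟩ <;>
      · rw [hl, List.prefix_nil] at hp
        exact absurd hp (by decide)
  · simp only [Bool.and_eq_true, Bool.not_eq_true'] at h2
    simp only [false_iff]
    rintro ⟨hp | hp, -⟩
    · have := hsw1.mpr hp; rw [h2.1] at this; exact Bool.false_ne_true this
    · have := hsw2.mpr hp; rw [h2.2] at this; exact Bool.false_ne_true this
  · simp only [false_iff]
    rintro ⟨-, hb⟩
    rw [hb] at h3; exact Bool.false_ne_true h3
  · simp only [true_iff]
    constructor
    · rcases Bool.eq_false_or_eq_true (PySem.Str.startswith url "https://") with hs | hs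
      · exact Or.inl (hsw1.mp hs)
      · rcases Bool.eq_false_or_eq_true (PySem.Str.startswith url "http://") with hs' | hs'
        · exact Or.inr (hsw2.mp hs')
        · exact absurd (by rw [hs, hs']; rfl) h2
    · exact Bool.eq_false_iff.mpr h3

-- A's any-of-substring scan over the WHOLE url equals "every char is not forbidden"
theorem pv_bad_iff (url : String) :
    (pvBadSubs.any (fun ch => PySem.Str.isIn ch url)) = false ↔
    url.toList.all (fun c => !(['"', '\'', '<', '>', '\n', '\r', '\t'].contains c)) = true := by
  have e1 : ("\"").toList = ['"'] := by decide
  have e2 : ("'").toList = ['\''] := by decide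
  have e3 : ("<").toList = ['<'] := by decide
  have e4 : (">").toList = ['>'] := by decide
  have e5 : ("\n").toList = ['\n'] := by decide
  have e6 : ("\r").toList = ['\r'] := by decide
  have e7 : ("\t").toList = ['\t'] := by decide
  simp [pvBadSubs, PySem.Chars.isIn_eq_false_iff, e1, e2, e3, e4, e5, e6, e7,
    List.singleton_infix_iff, List.all_eq_true]
  constructor
  · rintro ⟨h1, h2, h3, h4, h5, h6, h7⟩ x hx
    exact ⟨fun e => h1 (e ▸ hx), fun e => h2 (e ▸ hx), fun e => h3 (e ▸ hx),
      fun e => h4 (e ▸ hx), fun e => h5 (e ▸ hx), fun e => h6 (e ▸ hx), fun e => h7 (e ▸ hx)⟩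
  · intro a
    refine ⟨fun h => (a _ h).1 rfl, fun h => (a _ h).2.1 rfl, fun h => (a _ h).2.2.1 rfl,
      fun h => (a _ h).2.2.2.1 rfl, fun h => (a _ h).2.2.2.2.1 rfl,
      fun h => (a _ h).2.2.2.2.2.1 rfl, fun h => (a _ h).2.2.2.2.2.2 rfl⟩

-- "http(s)://" itself contains no forbidden character, so A's whole-string scan equals
-- B's body-only scan under the prefix
theorem pv_all_split (pre body : List Char)
    (hpre : pre.all (fun c => !(['"', '\'', '<', '>', '\n', '\r', '\t'].contains c)) = true) :
    (pre ++ body).all (fun c => !(['"', '\'', '<', '>', '\n', '\r', '\t'].contains c)) =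
    body.all (fun c => !(['"', '\'', '<', '>', '\n', '\r', '\t'].contains c)) := by
  rw [List.all_append, hpre, Bool.true_and]

-- ===== VERDICT (by name: the statement is the Claim_ definition above) =====
theorem is_safe_url_py_spec : Claim_equal_is_safe_url_py := by
  intro url _
  unfold Spec_is_safe_url_py
  rw [Bool.eq_iff_iff, pv_A_true_iff, pv_B_true_iff]
  constructor
  · rintro ⟨hp | hp, hbad⟩ <;> obtain ⟨body, hb⟩ := hp
    · refine ⟨body, Or.inl hb.symm, ?_⟩
      rw [pv_body_eq_all, ← pv_all_split "https://".toList body (by decide), hb]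
      exact (pv_bad_iff url).mp hbad
    · refine ⟨body, Or.inr hb.symm, ?_⟩
      rw [pv_body_eq_all, ← pv_all_split "http://".toList body (by decide), hb]
      exact (pv_bad_iff url).mp hbad
  · rintro ⟨body, hcs | hcs, hbody⟩
    · refine ⟨Or.inl ⟨body, hcs.symm⟩, (pv_bad_iff url).mpr ?_⟩
      rw [hcs, pv_all_split "https://".toList body (by decide), ← pv_body_eq_all]
      exact hbody
    · refine ⟨Or.inr ⟨body, hcs.symm⟩, (pv_bad_iff url).mpr ?_⟩
      rw [hcs, pv_all_split "http://".toList body (by decide), ← pv_body_eq_all]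
      exact hbody
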